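-- pv_equiv track=rewrite | github.com/GabrielPontolillo/Delta_Debugging_for_Regression_Testing_of_Quantum_Programs | dd_regression_tests/delta_application_test.py | count_unhashable
-- ===== SOURCE A (Python) =====
-- def count_unhashable(list_obj):
--     copy = list_obj.copy()
--     element = []
--     count = []
--     while len(copy) > 0:
--         val = copy.pop(0)
--         if val not in element:
--             element.append(val)
--             count.append(1)
--         else:
--             idx = element.index(val)
--             count[idx] = count[idx] + 1
--     return element, count
-- ===== SOURCE B (Python) =====
-- def count_unhashable(list_obj):
--     element = []
--     for val in list_obj:
--         if val not in element:
--             element.append(val)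
--     count = [list_obj.count(e) for e in element]
--     return element, count
-- ===== Notes on version B (the rewrite author's own statement) =====
-- stated objective: simpler
-- what changed: Replaces the single interleaved pop-dedup-and-increment loop over a mutated copy with a build-then-count decomposition: one pass collecting the unique elements in first-appearance order, then a comprehension counting each unique element in the original list via list.count.
import Mathlib
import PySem

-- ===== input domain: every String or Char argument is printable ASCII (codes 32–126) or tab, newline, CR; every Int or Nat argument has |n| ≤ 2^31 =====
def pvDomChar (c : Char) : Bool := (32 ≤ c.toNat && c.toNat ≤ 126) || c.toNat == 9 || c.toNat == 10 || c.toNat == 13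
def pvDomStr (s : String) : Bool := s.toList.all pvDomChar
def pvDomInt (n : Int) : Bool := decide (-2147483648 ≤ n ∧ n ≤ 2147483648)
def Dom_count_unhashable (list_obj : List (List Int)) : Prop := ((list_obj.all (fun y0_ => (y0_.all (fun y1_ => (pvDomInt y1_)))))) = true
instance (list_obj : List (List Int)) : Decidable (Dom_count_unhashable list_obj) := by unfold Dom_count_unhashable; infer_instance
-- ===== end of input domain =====

-- B replaces A's interleaved pop-dedup-and-increment loop with a build-then-count decomposition (simpler); same O(n^2) cost.


-- ===== PORT A =====
-- A's while loop: pop the head of the copy, append a new element with count 1, or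
-- increment count at element.index(val).  element.index(val) is only reached when
-- val ∈ element, so List.idxOf is exact there; count[idx] read via getD (idx is in range).
def countLoopA : List (List Int) → List (List Int) → List Int → List (List Int) × List Int
  | [], element, count => (element, count)
  | val :: copy, element, count =>
    if val ∈ element then
      let idx := element.idxOf val
      countLoopA copy element (count.set idx (count.getD idx 0 + 1))
    else
      countLoopA copy (element ++ [val]) (count ++ [1])

def count_unhashable (list_obj : List (List Int)) : List (List Int) × List Int :=
  countLoopA list_obj [] []

-- ===== PORT B =====
-- B's first pass: collect unique elements in first-appearance order.
def uniqPass : List (List Int) → List (List Int) → List (List Int)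
  | [], element => element
  | val :: rest, element =>
    if val ∈ element then uniqPass rest element else uniqPass rest (element ++ [val])

-- B's second pass: count each unique element in the original list (Python list.count).
def count_unhashable_alt (list_obj : List (List Int)) : List (List Int) × List Int :=
  let element := uniqPass list_obj []
  (element, element.map (fun e => (list_obj.count e : Int)))

-- ===== PRECONDITION & SPEC =====
def Spec_count_unhashable (list_obj : List (List Int)) (out : List (List Int) × List Int) : Prop := out = count_unhashable_alt list_obj
instance (list_obj : List (List Int)) (out : List (List Int) × List Int) : Decidable (Spec_count_unhashable list_obj out) := by unfold Spec_count_unhashable; infer_instance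

-- ===== CLAIM (what is proved, stated in full; the proofs are below) =====
def Claim_equal_count_unhashable : Prop := ∀ (list_obj : List (List Int)), Dom_count_unhashable list_obj → Spec_count_unhashable list_obj (count_unhashable list_obj)

-- ===== LEMMAS AND PROOFS =====

-- the loop invariant: with counts = element.map f, A's loop computes B's unique list
-- and, for each unique element, its pending count plus its count in the remainder.
lemma loopA_inv : ∀ (rest element : List (List Int)) (f : List Int → Int), element.Nodup →
    countLoopA rest element (element.map f) =
      (uniqPass rest element,
       (uniqPass rest element).map
         (fun x => (if x ∈ element then f x else 0) + (rest.count x : Int))) := by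
  intro rest
  induction rest with
  | nil =>
    intro e f _
    simp only [countLoopA, uniqPass, List.count_nil]
    refine congrArg₂ Prod.mk rfl ?_
    apply List.map_congr_left
    intro x hx
    simp [hx]
  | cons v r ih =>
    intro e f hnd
    by_cases hv : v ∈ e
    · -- increment branch
      have hidx : e.idxOf v < e.length := List.idxOf_lt_length_of_mem hv
      have hget : (e.map f).getD (e.idxOf v) 0 = f v := by
        rw [List.getD_eq_getElem _ _ (by simpa using hidx)]
        simp [List.getElem_idxOf]
      have hset : (e.map f).set (e.idxOf v) (f v + 1)
          = e.map (fun x => if x = v then f v + 1 else f x) := by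
        apply List.ext_getElem (by simp)
        intro i h1 h2
        simp only [List.length_set, List.length_map] at h1 h2
        by_cases hi : i = e.idxOf v
        · subst hi
          simp [List.getElem_idxOf]
        · have hne : e[i] ≠ v := by
            intro hEq
            apply hi
            have hEq2 : e[i] = e[e.idxOf v]'hidx := by
              rw [hEq, List.getElem_idxOf]
            exact hnd.getElem_inj_iff.mp hEq2
          have hi' : e.idxOf v ≠ i := fun h => hi h.symm
          simp [hi', hne]
      simp only [countLoopA, if_pos hv, hget, hset]
      rw [ih e (fun x => if x = v then f v + 1 else f x) hnd]
      simp only [uniqPass, if_pos hv]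
      refine congrArg₂ Prod.mk rfl ?_
      apply List.map_congr_left
      intro x _
      by_cases hx : x = v
      · subst hx
        simp [hv]
        omega
      · simp [hx, Ne.symm hx]
    · -- new-element branch
      have hmap : e.map f ++ [1] = (e ++ [v]).map (fun x => if x = v then 1 else f x) := by
        rw [List.map_append]
        congr 1
        · apply List.map_congr_left
          intro x hx
          have : x ≠ v := fun h => hv (h ▸ hx)
          simp [this]
        · simp
      have hnd' : (e ++ [v]).Nodup := by
        simp [List.nodup_append, hnd]
        intro a ha hav
        exact hv (hav ▸ ha)
      simp only [countLoopA, if_neg hv, hmap]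
      rw [ih (e ++ [v]) (fun x => if x = v then 1 else f x) hnd']
      simp only [uniqPass, if_neg hv]
      refine congrArg₂ Prod.mk rfl ?_
      apply List.map_congr_left
      intro x _
      by_cases hx : x = v
      · subst hx
        simp [hv]
        omega
      · simp [hx, Ne.symm hx]

-- ===== VERDICT (by name: the statement is the Claim_ definition above) =====
theorem count_unhashable_spec : Claim_equal_count_unhashable := by
  intro l _
  show count_unhashable l = count_unhashable_alt l
  have h := loopA_inv l [] (fun _ => 0) List.nodup_nil
  simp only [List.map_nil] at h
  simp only [count_unhashable, count_unhashable_alt, h]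
  refine congrArg₂ Prod.mk rfl ?_
  apply List.map_congr_left
  intro x _
  simp
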